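-- pv_equiv track=rewrite | github.com/protocaller/ProtoCaller | ProtoCaller/__init__.py | RESIDUETYPE
-- ===== SOURCE A (Python) =====
-- def RESIDUETYPE(res):
--     namesdict = {
--         "water": WATERNAMES,
--         "simple_anion": SIMPLEANIONNAMES,
--         "complex_anion": COMPLEXANIONNAMES,
--         "simple_cation": SIMPLECATIONNAMES,
--         "complex_cation": COMPLEXCATIONNAMES,
--         "amino_acid": AMINOACIDNAMES,
--         "amino_acid_modified": MODIFIEDAMINOACIDNAMES,
--         "cofactor": COFACTORNAMES,
--     }
--
--     res = res.upper().strip()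
--     for key, value in namesdict.items():
--         if res in value:
--             return key
--     return "ligand"
--
-- WATERNAMES = ["HOH", "WAT", "H2O", "SOL"]
--
-- SIMPLEANIONNAMES = ["CL", "BR", "F", "I"]
--
-- COMPLEXANIONNAMES = ["SO4", "PO4", "CO3"]
--
-- SIMPLECATIONNAMES = ["MG", "NA", "CA", "K"]
--
-- COMPLEXCATIONNAMES = ["FE", "CU", "NI", "CO", "MN", "CD"]
--
-- AMINOACIDNAMES = ["ALA", "ARG", "ASH", "ASN", "ASP", "CYM", "CYS", "CYX", "GLH", "GLN", "GLU", "GLY", "HID", "HIE",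
--                  "HIS", "HIP", "ILE", "LEU", "LYN", "LYS", "MET", "PHE", "PRO", "SER", "THR", "TRP", "TYR", "VAL"]
--
-- MODIFIEDAMINOACIDNAMES = ["MSE"]
--
-- COFACTORNAMES = ["ATP", "ADP", "GTP", "GDP", "FMN", "FAD", "HEM", "HEME", "NAD", "NAI", "NAP", "NDP"]
-- ===== SOURCE B (Python) =====
-- # One flat, hardcoded name -> category table (the category lists are pairwise
-- # disjoint, so a direct keyed lookup with default "ligand" is exact).
-- _RESIDUE_CATEGORY = {
--     "HOH": "water", "WAT": "water", "H2O": "water", "SOL": "water",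
--     "CL": "simple_anion", "BR": "simple_anion", "F": "simple_anion", "I": "simple_anion",
--     "SO4": "complex_anion", "PO4": "complex_anion", "CO3": "complex_anion",
--     "MG": "simple_cation", "NA": "simple_cation", "CA": "simple_cation", "K": "simple_cation",
--     "FE": "complex_cation", "CU": "complex_cation", "NI": "complex_cation",
--     "CO": "complex_cation", "MN": "complex_cation", "CD": "complex_cation",
--     "ALA": "amino_acid", "ARG": "amino_acid", "ASH": "amino_acid", "ASN": "amino_acid",
--     "ASP": "amino_acid", "CYM": "amino_acid", "CYS": "amino_acid", "CYX": "amino_acid",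
--     "GLH": "amino_acid", "GLN": "amino_acid", "GLU": "amino_acid", "GLY": "amino_acid",
--     "HID": "amino_acid", "HIE": "amino_acid", "HIS": "amino_acid", "HIP": "amino_acid",
--     "ILE": "amino_acid", "LEU": "amino_acid", "LYN": "amino_acid", "LYS": "amino_acid",
--     "MET": "amino_acid", "PHE": "amino_acid", "PRO": "amino_acid", "SER": "amino_acid",
--     "THR": "amino_acid", "TRP": "amino_acid", "TYR": "amino_acid", "VAL": "amino_acid",
--     "MSE": "amino_acid_modified",
--     "ATP": "cofactor", "ADP": "cofactor", "GTP": "cofactor", "GDP": "cofactor",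
--     "FMN": "cofactor", "FAD": "cofactor", "HEM": "cofactor", "HEME": "cofactor",
--     "NAD": "cofactor", "NAI": "cofactor", "NAP": "cofactor", "NDP": "cofactor",
-- }
--
--
-- def RESIDUETYPE(res):
--     return _RESIDUE_CATEGORY.get(res.upper().strip(), "ligand")
-- ===== Notes on version B (the rewrite author's own statement) =====
-- stated objective: idiomatic
-- what changed: Replaced the per-call loop over category name-lists (linear membership tests) by one flat hardcoded name->category dict, so the function is a single keyed lookup with default 'ligand'.
import Mathlib
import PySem

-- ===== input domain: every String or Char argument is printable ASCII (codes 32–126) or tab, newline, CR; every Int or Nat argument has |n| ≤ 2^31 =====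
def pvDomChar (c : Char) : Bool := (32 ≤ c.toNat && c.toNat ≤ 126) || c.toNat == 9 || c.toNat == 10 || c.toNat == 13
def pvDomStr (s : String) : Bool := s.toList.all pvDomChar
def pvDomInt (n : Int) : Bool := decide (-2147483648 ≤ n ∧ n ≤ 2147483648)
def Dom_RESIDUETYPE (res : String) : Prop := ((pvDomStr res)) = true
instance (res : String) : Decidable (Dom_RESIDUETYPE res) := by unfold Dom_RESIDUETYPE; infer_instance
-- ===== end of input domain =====

-- B replaces A's per-call loop over category name-lists by one flat hardcoded
-- name->category dict, so the body is a single keyed lookup (idiomatic).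

-- ===== PORT A =====
-- the module-level name-list constants used by A
def pvWATERNAMES : List String := ["HOH", "WAT", "H2O", "SOL"]
def pvSIMPLEANIONNAMES : List String := ["CL", "BR", "F", "I"]
def pvCOMPLEXANIONNAMES : List String := ["SO4", "PO4", "CO3"]
def pvSIMPLECATIONNAMES : List String := ["MG", "NA", "CA", "K"]
def pvCOMPLEXCATIONNAMES : List String := ["FE", "CU", "NI", "CO", "MN", "CD"]
def pvAMINOACIDNAMES : List String := ["ALA", "ARG", "ASH", "ASN", "ASP", "CYM", "CYS", "CYX", "GLH", "GLN", "GLU",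
  "GLY", "HID", "HIE", "HIS", "HIP", "ILE", "LEU", "LYN", "LYS", "MET", "PHE",
  "PRO", "SER", "THR", "TRP", "TYR", "VAL"]
def pvMODIFIEDAMINOACIDNAMES : List String := ["MSE"]
def pvCOFACTORNAMES : List String := ["ATP", "ADP", "GTP", "GDP", "FMN", "FAD", "HEM", "HEME", "NAD", "NAI", "NAP", "NDP"]

-- namesdict, built in the function body as in A (dict of category -> name list, insertion order)
def pvNamesdictA : List (String × List String) :=
  [ ("water", pvWATERNAMES),
    ("simple_anion", pvSIMPLEANIONNAMES),
    ("complex_anion", pvCOMPLEXANIONNAMES),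
    ("simple_cation", pvSIMPLECATIONNAMES),
    ("complex_cation", pvCOMPLEXCATIONNAMES),
    ("amino_acid", pvAMINOACIDNAMES),
    ("amino_acid_modified", pvMODIFIEDAMINOACIDNAMES),
    ("cofactor", pvCOFACTORNAMES) ]

-- the 'for key, value in namesdict.items(): if res in value: return key' loop
def pvLoopA (s : String) : List (String × List String) → String
  | [] => "ligand"
  | (key, value) :: rest => if s ∈ value then key else pvLoopA s rest

def RESIDUETYPE (res : String) : String :=
  pvLoopA (PySem.Str.strip (PySem.Str.upper res)) pvNamesdictA

-- ===== PORT B =====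
-- Source B's flat hardcoded name -> category dict literal
def pvResidueCategory : PySem.Dict String String :=
  PySem.Dict.mk
    [("HOH", "water"), ("WAT", "water"), ("H2O", "water"), ("SOL", "water"),
     ("CL", "simple_anion"), ("BR", "simple_anion"), ("F", "simple_anion"), ("I", "simple_anion"),
     ("SO4", "complex_anion"), ("PO4", "complex_anion"), ("CO3", "complex_anion"),
     ("MG", "simple_cation"), ("NA", "simple_cation"), ("CA", "simple_cation"), ("K", "simple_cation"),
     ("FE", "complex_cation"), ("CU", "complex_cation"), ("NI", "complex_cation"),
     ("CO", "complex_cation"), ("MN", "complex_cation"), ("CD", "complex_cation"),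
     ("ALA", "amino_acid"), ("ARG", "amino_acid"), ("ASH", "amino_acid"), ("ASN", "amino_acid"),
     ("ASP", "amino_acid"), ("CYM", "amino_acid"), ("CYS", "amino_acid"), ("CYX", "amino_acid"),
     ("GLH", "amino_acid"), ("GLN", "amino_acid"), ("GLU", "amino_acid"), ("GLY", "amino_acid"),
     ("HID", "amino_acid"), ("HIE", "amino_acid"), ("HIS", "amino_acid"), ("HIP", "amino_acid"),
     ("ILE", "amino_acid"), ("LEU", "amino_acid"), ("LYN", "amino_acid"), ("LYS", "amino_acid"),
     ("MET", "amino_acid"), ("PHE", "amino_acid"), ("PRO", "amino_acid"), ("SER", "amino_acid"),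
     ("THR", "amino_acid"), ("TRP", "amino_acid"), ("TYR", "amino_acid"), ("VAL", "amino_acid"),
     ("MSE", "amino_acid_modified"),
     ("ATP", "cofactor"), ("ADP", "cofactor"), ("GTP", "cofactor"), ("GDP", "cofactor"),
     ("FMN", "cofactor"), ("FAD", "cofactor"), ("HEM", "cofactor"), ("HEME", "cofactor"),
     ("NAD", "cofactor"), ("NAI", "cofactor"), ("NAP", "cofactor"), ("NDP", "cofactor")]

def RESIDUETYPE_alt (res : String) : String :=
  pvResidueCategory.getD (PySem.Str.strip (PySem.Str.upper res)) "ligand"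

-- ===== PRECONDITION & SPEC =====
def Spec_RESIDUETYPE (res : String) (out : String) : Prop := out = RESIDUETYPE_alt res
instance (res : String) (out : String) : Decidable (Spec_RESIDUETYPE res out) := by unfold Spec_RESIDUETYPE; infer_instance

-- ===== CLAIM =====
def Claim_equal_RESIDUETYPE : Prop := ∀ (res : String), Dom_RESIDUETYPE res → Spec_RESIDUETYPE res (RESIDUETYPE res)

-- ===== LEMMAS AND PROOFS =====

-- lookup in the pairs of one category prepended to anything = membership test in its name list
theorem pv_getD_block (s cat d : String) (names : List String) (rest : List (String × String)) :
    (PySem.Dict.mk (names.map (fun n => (n, cat)) ++ rest)).getD s d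
      = if s ∈ names then cat else (PySem.Dict.mk rest).getD s d := by
  induction names with
  | nil => simp
  | cons n ns ih =>
      by_cases h : n = s
      · subst h
        simp [PySem.Dict.getD_eq_get?_getD, PySem.Dict.get?_mk_cons]
      · have h' : s = n ∨ s ∈ ns ↔ s ∈ ns := or_iff_right (fun e => h e.symm)
        simp only [List.map_cons, List.cons_append, PySem.Dict.getD_eq_get?_getD,
          PySem.Dict.get?_mk_cons] at *
        simp only [List.mem_cons, h', beq_iff_eq, h, if_false]
        exact ih

-- lookup in any flattened category table = A's first-match loop over the categories
theorem pv_getD_flat (s : String) (cats : List (String × List String)) :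
    (PySem.Dict.mk (cats.flatMap (fun p => p.2.map (fun name => (name, p.1))))).getD s "ligand"
      = pvLoopA s cats := by
  induction cats with
  | nil => simp [pvLoopA, PySem.Dict.getD_eq_get?_getD, PySem.Dict.get?]
  | cons c cs ih =>
      obtain ⟨cat, names⟩ := c
      simp only [List.flatMap_cons, pvLoopA, pv_getD_block]
      split
      · rfl
      · exact ih

-- B's flat literal table is exactly A's category table flattened (checked by computation)
theorem pv_flat_eq :
    pvResidueCategory
      = PySem.Dict.mk (pvNamesdictA.flatMap (fun p => p.2.map (fun name => (name, p.1)))) := by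
  rfl

-- ===== VERDICT =====
theorem RESIDUETYPE_spec : Claim_equal_RESIDUETYPE := by
  intro res _
  unfold Spec_RESIDUETYPE RESIDUETYPE RESIDUETYPE_alt
  rw [pv_flat_eq, pv_getD_flat]
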